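-- pv_equiv track=rewrite | github.com/Bobcatsoap/jy-server | cell/RoomType6PassiveFindCards.py | find_dui_zi
-- ===== SOURCE A (Python) =====
-- def find_dui_zi(target_cards):
--     new_cards = target_cards.copy()
--     new_cards.sort()
--     duizi = []
--     for i in target_cards:
--         if new_cards.count(i) >= 2:
--             temp = []
--             for j in range(0, 2):
--                 temp.append(i)
--                 new_cards.remove(i)
--             if temp not in duizi:
--                 duizi.append(temp)
--
--     return duizi
-- ===== SOURCE B (Python) =====
-- def find_dui_zi(target_cards):
--     cnt = {}
--     for v in target_cards:
--         cnt[v] = cnt.get(v, 0) + 1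
--     return [[v, v] for v in cnt if cnt[v] >= 2]
-- ===== Notes on version B (the rewrite author's own statement) =====
-- stated objective: faster
-- what changed: Replaces the sort plus repeated count/remove scans over a mutated copy with a single counting pass into a dict, then one emission pass over the dict's first-occurrence keys.
import Mathlib
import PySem

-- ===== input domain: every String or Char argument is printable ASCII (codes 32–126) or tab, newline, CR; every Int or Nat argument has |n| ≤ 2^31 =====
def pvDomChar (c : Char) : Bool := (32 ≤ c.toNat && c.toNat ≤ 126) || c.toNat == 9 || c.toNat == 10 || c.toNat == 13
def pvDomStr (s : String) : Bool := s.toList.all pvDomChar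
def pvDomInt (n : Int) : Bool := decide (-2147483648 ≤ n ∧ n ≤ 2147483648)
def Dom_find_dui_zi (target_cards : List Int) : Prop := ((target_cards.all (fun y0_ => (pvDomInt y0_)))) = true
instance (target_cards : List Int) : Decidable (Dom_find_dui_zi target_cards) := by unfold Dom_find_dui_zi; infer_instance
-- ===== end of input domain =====

-- B replaces A's sort + repeated count/remove scans with one counting pass into a dict and one
-- ordered emission pass (objective: faster).

-- ===== PORT A =====
-- loop body of A's 'for i in target_cards' (state: (new_cards, duizi))
def pvStepA (st : List Int × List (List Int)) (i : Int) : List Int × List (List Int) :=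
  if 2 ≤ PySem.List.count st.1 i then
    -- 'for j in range(0, 2): temp.append(i); new_cards.remove(i)' (remove cannot raise: count ≥ 2)
    let r := (PySem.List.pyRange 0 2 1).foldl
      (fun (p : List Int × List Int) _ => (p.1 ++ [i], (PySem.List.remove? p.2 i).getD p.2))
      ([], st.1)
    if r.1 ∉ st.2 then (r.2, st.2 ++ [r.1]) else (r.2, st.2)
  else st

def find_dui_zi (target_cards : List Int) : List (List Int) :=
  (target_cards.foldl pvStepA (PySem.List.sorted target_cards (fun x => x) false, [])).2

-- ===== PORT B =====
def find_dui_zi_alt (target_cards : List Int) : List (List Int) :=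
  let cnt := target_cards.foldl (fun d v => d.modify v 0 (· + 1))
    (PySem.Dict.empty : PySem.Dict Int Int)
  (cnt.keys.filter (fun v => decide (2 ≤ cnt.getD v 0))).map (fun v => [v, v])

-- ===== PRECONDITION & SPEC =====
def Spec_find_dui_zi (target_cards : List Int) (out : List (List Int)) : Prop := out = find_dui_zi_alt target_cards
instance (target_cards : List Int) (out : List (List Int)) : Decidable (Spec_find_dui_zi target_cards out) := by unfold Spec_find_dui_zi; infer_instance

-- ===== CLAIM (what is proved, stated in full; the proofs are below) =====
def Claim_equal_find_dui_zi : Prop := ∀ (target_cards : List Int), Dom_find_dui_zi target_cards → Spec_find_dui_zi target_cards (find_dui_zi target_cards)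

-- ===== LEMMAS AND PROOFS =====

-- the common value: pairs [v,v] for first-occurrence-ordered distinct v of p with count ≥ 2 in tc
def pvG (tc p : List Int) : List (List Int) :=
  ((PySem.Set.ofList p).filter (fun v => decide ((2:Int) ≤ (List.count v tc : Int)))).map
    (fun v => [v, v])

lemma pv_mem_map_pair (l : List Int) (x : Int) :
    [x, x] ∈ l.map (fun v => [v, v]) ↔ x ∈ l := by
  simp

lemma pv_mem_pvG (tc p : List Int) (i : Int) :
    [i, i] ∈ pvG tc p ↔ i ∈ p ∧ 2 ≤ List.count i tc := by
  unfold pvG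
  rw [pv_mem_map_pair, List.mem_filter, PySem.Set.mem_ofList]
  constructor
  · rintro ⟨h1, h2⟩; exact ⟨h1, by simpa using of_decide_eq_true h2⟩
  · rintro ⟨h1, h2⟩; exact ⟨h1, decide_eq_true (by exact_mod_cast h2)⟩

lemma pv_ofList_snoc (p : List Int) (i : Int) :
    PySem.Set.ofList (p ++ [i]) =
      if i ∈ p then PySem.Set.ofList p else PySem.Set.ofList p ++ [i] := by
  rw [PySem.Set.ofList_eq_foldl, List.foldl_append, ← PySem.Set.ofList_eq_foldl]
  simp only [List.foldl_cons, List.foldl_nil, PySem.Set.add]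
  by_cases h : i ∈ p
  · rw [if_pos h, if_pos]
    simpa [List.contains_iff, PySem.Set.mem_ofList] using h
  · rw [if_neg h, if_neg]
    simpa [List.contains_iff, PySem.Set.mem_ofList] using h

lemma pvG_snoc (tc p : List Int) (i : Int) :
    pvG tc (p ++ [i]) =
      if i ∈ p then pvG tc p
      else if 2 ≤ List.count i tc then pvG tc p ++ [[i, i]] else pvG tc p := by
  unfold pvG
  rw [pv_ofList_snoc]
  by_cases h : i ∈ p
  · simp [h]
  · rw [if_neg h, List.filter_append, List.map_append]
    by_cases hk : 2 ≤ List.count i tc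
    · rw [if_neg h, if_pos hk]
      simp [hk]
    · rw [if_neg h, if_neg hk]
      simp
      omega

lemma pv_loop (tc : List Int) : ∀ (rest p nc : List Int),
    tc = p ++ rest →
    (∀ v, List.count v nc = List.count v tc - 2 * min (List.count v p) (List.count v tc / 2)) →
    (rest.foldl pvStepA (nc, pvG tc p)).2 = pvG tc (p ++ rest) := by
  intro rest
  induction rest with
  | nil => intro p nc _ _; simpa using rfl
  | cons i rest' ih =>
    intro p nc htc hinv
    have hmk : List.count i p + 1 ≤ List.count i tc := by
      rw [htc]; simp [List.count_append]
    have hci : List.count i nc =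
        List.count i tc - 2 * min (List.count i p) (List.count i tc / 2) := hinv i
    rw [List.foldl_cons]
    have hstep : pvStepA (nc, pvG tc p) i =
        (((if 2 ≤ List.count i nc then (nc.erase i).erase i else nc) : List Int),
          pvG tc (p ++ [i])) := by
      unfold pvStepA
      by_cases hfire : 2 ≤ List.count i nc
      · have hcnt : 2 ≤ PySem.List.count nc i := by
          rw [PySem.List.count_eq]; exact hfire
        rw [if_pos hcnt]
        have hin : i ∈ nc := List.count_pos_iff.mp (by omega)
        have hr1 : PySem.List.remove? nc i = some (nc.erase i) :=
          PySem.List.remove?_eq_some_erase nc i hin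
        have hin2 : i ∈ nc.erase i := by
          apply List.count_pos_iff.mp
          rw [List.count_erase_self]; omega
        have hr2 : PySem.List.remove? (nc.erase i) i = some ((nc.erase i).erase i) :=
          PySem.List.remove?_eq_some_erase (nc.erase i) i hin2
        have hrange : PySem.List.pyRange 0 2 1 = [0, 1] := by decide
        rw [hrange]
        simp only [List.foldl_cons, List.foldl_nil, hr1, hr2, Option.getD_some,
          List.nil_append, List.singleton_append]
        -- temp = [i,i]; now the duizi membership test
        have hk2 : 2 ≤ List.count i tc := by omega
        rw [pvG_snoc, if_pos hfire]
        by_cases hip : i ∈ p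
        · rw [if_neg (not_not_intro ((pv_mem_pvG tc p i).mpr ⟨hip, hk2⟩)), if_pos hip]
        · rw [if_pos (fun hmem => hip ((pv_mem_pvG tc p i).mp hmem).1), if_neg hip,
            if_pos hk2]
      · rw [if_neg (by rw [PySem.List.count_eq]; exact hfire), if_neg hfire]
        rw [pvG_snoc]
        by_cases hk2 : 2 ≤ List.count i tc
        · have hip : i ∈ p := by
            apply List.count_pos_iff.mp
            omega
          rw [if_pos hip]
        · by_cases hip : i ∈ p
          · rw [if_pos hip]
          · rw [if_neg hip, if_neg hk2]
    rw [hstep]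
    have hres := ih (p ++ [i]) (if 2 ≤ List.count i nc then (nc.erase i).erase i else nc)
      (by rw [htc]; simp) ?_
    · simpa using hres
    · intro v
      by_cases hv : v = i
      · subst hv
        have h1 : List.count v (p ++ [v]) = List.count v p + 1 := by simp
        rw [h1]
        by_cases hfire : 2 ≤ List.count v nc
        · rw [if_pos hfire, List.count_erase_self, List.count_erase_self]
          omega
        · rw [if_neg hfire]
          omega
      · have hc : List.count v (p ++ [i]) = List.count v p := by
          have h0 : List.count v [i] = 0 := by
            rw [List.count_eq_zero]
            simpa using hv
          simp [List.count_append, h0]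
        rw [hc]
        by_cases hfire : 2 ≤ List.count i nc
        · rw [if_pos hfire, List.count_erase_of_ne hv, List.count_erase_of_ne hv]
          exact hinv v
        · rw [if_neg hfire]; exact hinv v

lemma pvA_eq (tc : List Int) : find_dui_zi tc = pvG tc tc := by
  unfold find_dui_zi
  have h0 : pvG tc [] = [] := rfl
  have := pv_loop tc tc [] (PySem.List.sorted tc (fun x => x) false) (by simp) ?_
  · rw [h0] at this; simpa using this
  · intro v
    have hperm := PySem.List.sorted_perm tc (fun x => x) false
    rw [hperm.count_eq]
    simp

lemma pvB_eq (tc : List Int) : find_dui_zi_alt tc = pvG tc tc := by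
  simp only [find_dui_zi_alt, pvG, ← PySem.Dict.counter_eq_foldl, PySem.Dict.keys_counter,
    PySem.Dict.getD_counter]

-- ===== VERDICT (by name: the statement is the Claim_ definition above) =====
theorem find_dui_zi_spec : Claim_equal_find_dui_zi := by
  intro tc _
  unfold Spec_find_dui_zi
  rw [pvA_eq, pvB_eq]
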